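-- pv_equiv track=rewrite | github.com/SmokeySmith/discordbot | src/diceRoller.py | isDieCommand
-- ===== SOURCE A (Python) =====
-- def isDieCommand(input:str) -> bool:
--     if len(input) < 2:
--         return False
--     dCharacters = input.lower().count('d')
--     if dCharacters != 1:
--         return False
--     spilt = input.lower().split('d')
--     if len(spilt) != 2:
--         return False
--
--     for index, sec in enumerate(spilt):
--         if index == 0 and sec == '':
--             continue
--         if sec.isdigit() and sec[0] != '0' and len(sec) <= 3:
--             continue
--         return False
--
--     return True
-- ===== SOURCE B (Python) =====
-- def isDieCommand(input: str) -> bool: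
--     # One-pass DFA over the lowercased characters.
--     # States: 0 start, 1-3 = prefix digits seen, 4 = just consumed 'd',
--     # 5-7 = suffix digits seen, -1 = reject. Accept iff final state in 5..7.
--     state = 0
--     for ch in input.lower():
--         if state < 0:
--             break
--         if ch == 'd':
--             state = 4 if state <= 3 else -1
--         elif ch.isdigit():
--             if state in (0, 4):
--                 state = state + 1 if ch != '0' else -1
--             elif state in (3, 7):
--                 state = -1
--             else:
--                 state = state + 1
--         else:
--             state = -1
--     return state >= 5
-- ===== Notes on version B (the rewrite author's own statement) =====
-- stated objective: alternative
-- what changed: Replaces A's staged passes (length guard, d-count, split, enumerate loop with per-section digit/zero/length checks) by a single left-to-right pass of an 8-state finite automaton over the lowercased characters that tracks prefix/suffix digit counts and accepts iff it ends in a suffix state.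
import Mathlib
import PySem

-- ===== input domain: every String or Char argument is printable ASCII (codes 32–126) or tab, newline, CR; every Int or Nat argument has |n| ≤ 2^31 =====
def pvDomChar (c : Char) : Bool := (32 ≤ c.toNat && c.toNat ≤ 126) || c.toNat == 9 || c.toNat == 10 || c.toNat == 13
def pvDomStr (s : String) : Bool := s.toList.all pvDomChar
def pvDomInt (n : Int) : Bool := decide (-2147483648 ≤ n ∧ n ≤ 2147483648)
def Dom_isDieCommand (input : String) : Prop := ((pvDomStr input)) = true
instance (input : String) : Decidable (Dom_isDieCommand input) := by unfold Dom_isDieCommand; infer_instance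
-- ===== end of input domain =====

-- B replaces A's staged passes (length guard, d-count, split, enumerate loop) by a single
-- one-pass finite automaton over the lowercased characters. Return value only; no mutation.

-- ===== PORT A =====
def isDieCommand (input : String) : Bool :=
  let s := input.toList
  if s.length < 2 then false
  else
    let dCharacters := PySem.Chars.count (PySem.Chars.lower s) ['d']
    if dCharacters ≠ 1 then false
    else
      let spilt := PySem.Chars.splitOn (PySem.Chars.lower s) ['d']
      if spilt.length ≠ 2 then false
      else
        -- the for/continue/return-False loop: every (index, sec) must pass one of the two 'continue' tests
        (PySem.List.enumerate spilt).all (fun p =>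
          (p.1 == 0 && p.2 == ([] : List Char)) ||
          (PySem.Chars.strIsdigit p.2 && !(p.2.head? == some '0') && decide (p.2.length ≤ 3)))

-- ===== PORT B =====
-- DFA states (Option Nat; none = Python's -1 reject state): 0 start, 1-3 prefix digits,
-- 4 just after 'd', 5-7 suffix digits. One transition per character, as in Source B.
def pvStep (st : Option Nat) (c : Char) : Option Nat :=
  match st with
  | none => none
  | some s =>
    if c = 'd' then (if s ≤ 3 then some 4 else none)
    else if PySem.Chars.isdigit c then
      if s = 0 ∨ s = 4 then (if c ≠ '0' then some (s + 1) else none)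
      else if s = 3 ∨ s = 7 then none
      else some (s + 1)
    else none

def isDieCommand_alt (input : String) : Bool :=
  match (PySem.Chars.lower input.toList).foldl pvStep (some 0) with
  | some s => decide (5 ≤ s)
  | none => false

-- ===== PRECONDITION & SPEC =====
def Spec_isDieCommand (input : String) (out : Bool) : Prop := out = isDieCommand_alt input
instance (input : String) (out : Bool) : Decidable (Spec_isDieCommand input out) := by unfold Spec_isDieCommand; infer_instance

-- ===== CLAIM (what is proved, stated in full; the proofs are below) =====
def Claim_equal_isDieCommand : Prop := ∀ (input : String), Dom_isDieCommand input → Spec_isDieCommand input (isDieCommand input)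

-- ===== LEMMAS AND PROOFS =====

-- the shared 'section is a valid die number' test (A's loop body test, B's accepting runs)
def pvOk (s : List Char) : Bool :=
  PySem.Chars.strIsdigit s && !(s.head? == some '0') && decide (s.length ≤ 3)

lemma pv_count_go_single (c : Char) :
    ∀ (L : List Char) (fuel acc : Nat), L.length ≤ fuel →
      PySem.Chars.count.go [c] fuel L acc = acc + L.count c := by
  intro L
  induction L with
  | nil =>
      intro fuel acc _
      cases fuel <;> simp [PySem.Chars.count.go]
  | cons h t ih =>
      intro fuel acc hf
      cases fuel with
      | zero => simp at hf
      | succ f =>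
        have ht : t.length ≤ f := by simpa using hf
        by_cases hc : c = h
        · subst hc
          simp [PySem.Chars.count.go, List.isPrefixOf, ih f (acc + 1) ht]
          omega
        · have hc' : ¬ h = c := fun e => hc e.symm
          simp [PySem.Chars.count.go, List.isPrefixOf, hc, ih f acc ht, hc']

lemma pv_count_single (c : Char) (L : List Char) :
    PySem.Chars.count L [c] = L.count c := by
  simpa [PySem.Chars.count] using pv_count_go_single c L L.length 0 le_rfl

lemma pv_splitgo_no (q : List Char) :
    ∀ (fuel : Nat) (cur : List Char) (acc : List (List Char)), 'd' ∉ q → q.length ≤ fuel →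
      PySem.Chars.splitOn.go ['d'] fuel q cur acc = acc.reverse ++ [cur.reverse ++ q] := by
  induction q with
  | nil =>
      intro fuel cur acc _ _
      cases fuel <;> simp [PySem.Chars.splitOn.go]
  | cons h t ih =>
      intro fuel cur acc hm hf
      cases fuel with
      | zero => simp at hf
      | succ f =>
        have hd : ¬ ('d' = h) := fun e => hm (by simp [← e])
        have ht : 'd' ∉ t := fun e => hm (by simp [e])
        simp [PySem.Chars.splitOn.go, List.isPrefixOf, hd,
              ih f (h :: cur) acc ht (by simpa using hf)]

lemma pv_splitgo_one :
    ∀ (p : List Char) (q : List Char) (fuel : Nat) (cur : List Char) (acc : List (List Char)),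
      'd' ∉ p → 'd' ∉ q → p.length + 1 + q.length ≤ fuel →
      PySem.Chars.splitOn.go ['d'] fuel (p ++ 'd' :: q) cur acc =
        acc.reverse ++ [cur.reverse ++ p, q] := by
  intro p
  induction p with
  | nil =>
      intro q fuel cur acc _ hq hf
      cases fuel with
      | zero => simp at hf
      | succ f =>
        have hqf : q.length ≤ f := by simp at hf; omega
        simp [PySem.Chars.splitOn.go, List.isPrefixOf,
              pv_splitgo_no q f [] (cur.reverse :: acc) hq hqf]
  | cons h t ih =>
      intro q fuel cur acc hp hq hf
      cases fuel with
      | zero => simp at hf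
      | succ f =>
        have hd : ¬ ('d' = h) := fun e => hp (by simp [← e])
        have ht : 'd' ∉ t := fun e => hp (by simp [e])
        simp [PySem.Chars.splitOn.go, List.isPrefixOf, hd,
              ih q f (h :: cur) acc ht hq (by simp at hf ⊢; omega)]

lemma pv_splitOn_one (p q : List Char) (hp : 'd' ∉ p) (hq : 'd' ∉ q) :
    PySem.Chars.splitOn (p ++ 'd' :: q) ['d'] = [p, q] := by
  simp only [PySem.Chars.splitOn]
  rw [pv_splitgo_one p q _ [] [] hp hq (by simp; omega)]
  simp

lemma pv_first_split (L : List Char) (h : 'd' ∈ L) :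
    ∃ p q, L = p ++ 'd' :: q ∧ 'd' ∉ p := by
  induction L with
  | nil => simp at h
  | cons c t ih =>
      by_cases hc : c = 'd'
      · exact ⟨[], t, by simp [hc], by simp⟩
      · have ht : 'd' ∈ t := by
          rcases List.mem_cons.mp h with e | e
          · exact absurd e.symm hc
          · exact e
        obtain ⟨p, q, hL, hp⟩ := ih ht
        refine ⟨c :: p, q, by simp [hL], ?_⟩
        intro hm
        rcases List.mem_cons.mp hm with e | e
        · exact hc e.symm
        · exact hp e

-- B-side: the reject state absorbs
lemma pv_foldl_none : ∀ (t : List Char), List.foldl pvStep none t = none := by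
  intro t
  induction t with
  | nil => rfl
  | cons c r ih => simpa [pvStep] using ih

-- single-transition facts about the DFA
lemma pv_step_d (s : Nat) (h : s ≤ 3) : pvStep (some s) 'd' = some 4 := by
  simp [pvStep, h]

lemma pv_step_d_hi (s : Nat) (h : ¬ s ≤ 3) : pvStep (some s) 'd' = none := by
  simp [pvStep, h]

lemma pv_step_nond (s : Nat) (c : Char) (hcd : ¬ c = 'd')
    (hdig : PySem.Chars.isdigit c = false) : pvStep (some s) c = none := by
  simp [pvStep, hcd, hdig]

lemma pv_step_digit_mid (b k : Nat) (c : Char) (hb : b = 0 ∨ b = 4) (h1 : 1 ≤ k) (hk : k ≤ 2)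
    (hcd : ¬ c = 'd') (hdig : PySem.Chars.isdigit c = true) :
    pvStep (some (b + k)) c = some (b + (k + 1)) := by
  have h04 : ¬ (b + k = 0 ∨ b + k = 4) := by rcases hb with rfl | rfl <;> omega
  have h37 : ¬ (b + k = 3 ∨ b + k = 7) := by rcases hb with rfl | rfl <;> omega
  simp only [pvStep]
  rw [if_neg hcd, if_pos hdig, if_neg h04, if_neg h37]
  exact congrArg some (Nat.add_assoc b k 1)

lemma pv_step_digit_full (b : Nat) (c : Char) (hb : b = 0 ∨ b = 4)
    (hcd : ¬ c = 'd') (hdig : PySem.Chars.isdigit c = true) :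
    pvStep (some (b + 3)) c = none := by
  have h04 : ¬ (b + 3 = 0 ∨ b + 3 = 4) := by rcases hb with rfl | rfl <;> omega
  have h37 : (b + 3 = 3 ∨ b + 3 = 7) := by rcases hb with rfl | rfl <;> omega
  simp only [pvStep]
  rw [if_neg hcd, if_pos hdig, if_neg h04, if_pos h37]

lemma pv_step_digit_start (b : Nat) (c : Char) (hb : b = 0 ∨ b = 4)
    (hcd : ¬ c = 'd') (hdig : PySem.Chars.isdigit c = true) (h0 : ¬ c = '0') :
    pvStep (some b) c = some (b + 1) := by
  have h04 : (b = 0 ∨ b = 4) := hb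
  simp only [pvStep]
  rw [if_neg hcd, if_pos hdig, if_pos h04, if_pos h0]

lemma pv_step_zero_start (b : Nat) (hb : b = 0 ∨ b = 4) :
    pvStep (some b) '0' = none := by
  have hcd : ¬ ('0' : Char) = 'd' := by decide
  have hdig : PySem.Chars.isdigit '0' = true := by decide
  simp only [pvStep]
  rw [if_neg hcd, if_pos hdig, if_pos hb, if_neg (by simp : ¬ ('0' : Char) ≠ '0')]

-- B-side: running the DFA from a mid-number state (k digits already read, offset b = 0/4)
lemma pv_runMid :
    ∀ (t : List Char) (b k : Nat), (b = 0 ∨ b = 4) → 1 ≤ k → k ≤ 3 → 'd' ∉ t →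
      List.foldl pvStep (some (b + k)) t =
        if t.all PySem.Chars.isdigit && decide (k + t.length ≤ 3)
        then some (b + k + t.length) else none := by
  intro t
  induction t with
  | nil =>
      intro b k _ _ h3 _
      simp [h3]
  | cons c r ih =>
      intro b k hb h1 h3 hm
      have hcd : ¬ (c = 'd') := fun e => hm (by simp [e])
      have hrd : 'd' ∉ r := fun e => hm (by simp [e])
      by_cases hdig : PySem.Chars.isdigit c = true
      · by_cases hk3 : k = 3
        · subst hk3
          rw [List.foldl_cons, pv_step_digit_full b c hb hcd hdig, pv_foldl_none]
          simp
        · rw [List.foldl_cons, pv_step_digit_mid b k c hb h1 (by omega) hcd hdig,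
              ih b (k + 1) hb (by omega) (by omega) hrd]
          simp only [List.all_cons, hdig, Bool.true_and, List.length_cons]
          by_cases hall : r.all PySem.Chars.isdigit = true
          · by_cases hlen : k + 1 + r.length ≤ 3
            · have hlen' : k + (r.length + 1) ≤ 3 := by omega
              simp [hall, hlen, hlen']
              omega
            · have hlen' : ¬ (k + (r.length + 1) ≤ 3) := by omega
              simp [hall, hlen, hlen']
          · simp [hall]
      · rw [List.foldl_cons,
            pv_step_nond (b + k) c hcd (Bool.eq_false_iff.mpr hdig), pv_foldl_none]
        simp [Bool.eq_false_iff.mpr hdig]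

-- B-side: running the DFA on a d-free section from a fresh state (0 = before d, 4 = after d)
lemma pv_runStart (t : List Char) (b : Nat) (hb : b = 0 ∨ b = 4) (ht : 'd' ∉ t) :
    List.foldl pvStep (some b) t =
      if t = [] then some b else if pvOk t then some (b + t.length) else none := by
  cases t with
  | nil => simp
  | cons c r =>
      have hcd : ¬ (c = 'd') := fun e => ht (by simp [e])
      have hrd : 'd' ∉ r := fun e => ht (by simp [e])
      by_cases hdig : PySem.Chars.isdigit c = true
      · by_cases h0 : c = '0'
        · subst h0
          rw [List.foldl_cons, pv_step_zero_start b hb, pv_foldl_none]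
          simp [pvOk]
        · rw [List.foldl_cons, pv_step_digit_start b c hb hcd hdig h0,
              pv_runMid r b 1 hb le_rfl (by omega) hrd]
          simp only [if_neg (List.cons_ne_nil c r), pvOk, PySem.Chars.strIsdigit,
                     List.all_cons, hdig, Bool.true_and, List.length_cons,
                     List.head?_cons, List.isEmpty_cons]
          by_cases hall : r.all PySem.Chars.isdigit = true
          · by_cases hlen : 1 + r.length ≤ 3
            · have hlen' : r.length + 1 ≤ 3 := by omega
              simp [hall, hlen, hlen', h0]
              omega
            · have hlen' : ¬ (r.length + 1 ≤ 3) := by omega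
              simp [hall, hlen, hlen']
          · simp [hall]
      · rw [List.foldl_cons,
            pv_step_nond b c hcd (Bool.eq_false_iff.mpr hdig), pv_foldl_none]
        simp [pvOk, PySem.Chars.strIsdigit, Bool.eq_false_iff.mpr hdig]

-- A's value in the exactly-one-'d' case
lemma pv_A_one (input : String) (p q : List Char)
    (hL : PySem.Chars.lower input.toList = p ++ 'd' :: q) (hp : 'd' ∉ p) (hq : 'd' ∉ q) :
    isDieCommand input = ((p.isEmpty || pvOk p) && pvOk q) := by
  have hS : input.toList.length = input.length := by simp
  have hlen : input.toList.length = p.length + 1 + q.length := by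
    have := congrArg List.length hL
    simp only [PySem.Chars.lower, List.length_map, List.length_append, List.length_cons] at this
    omega
  by_cases hsmall : input.toList.length < 2
  · -- then p = [] and q = [], so pvOk q = false and the RHS is false too
    have hp0 : p = [] := by
      cases p with
      | nil => rfl
      | cons a b => simp [List.length] at hlen; omega
    have hq0 : q = [] := by
      cases q with
      | nil => rfl
      | cons a b => simp [List.length] at hlen; omega
    have h2 : ¬ 1 < input.length := by rw [← hS]; omega
    simp [isDieCommand, h2, hq0, pvOk, PySem.Chars.strIsdigit]
  · have h2 : 1 < input.length := by rw [← hS]; omega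
    have hcp : p.count 'd' = 0 := List.count_eq_zero_of_not_mem hp
    have hcq : q.count 'd' = 0 := List.count_eq_zero_of_not_mem hq
    simp only [isDieCommand]
    rw [hL]
    simp [h2, pv_count_single, List.count_append, hcp, hcq,
          pv_splitOn_one p q hp hq, PySem.List.enumerate, pvOk, List.isEmpty_iff]

-- B's value in the exactly-one-'d' case
lemma pv_B_one (input : String) (p q : List Char)
    (hL : PySem.Chars.lower input.toList = p ++ 'd' :: q) (hp : 'd' ∉ p) (hq : 'd' ∉ q) :
    isDieCommand_alt input = ((p.isEmpty || pvOk p) && pvOk q) := by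
  simp only [isDieCommand_alt, hL, List.foldl_append, List.foldl_cons]
  rw [pv_runStart p 0 (Or.inl rfl) hp]
  by_cases hp0 : p = []
  · subst hp0
    have hstep : pvStep (some 0) 'd' = some 4 := pv_step_d 0 (by omega)
    rw [if_pos rfl, hstep, pv_runStart q 4 (Or.inr rfl) hq]
    by_cases hq0 : q = []
    · simp [hq0, pvOk, PySem.Chars.strIsdigit]
    · by_cases hokq : pvOk q = true
      · have hq1 : 1 ≤ q.length := List.length_pos_iff.mpr hq0
        simp [hq0, hokq]
        omega
      · simp [hq0, hokq]
  · rw [if_neg hp0]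
    by_cases hokp : pvOk p = true
    · have hp3 : p.length ≤ 3 := by
        have := hokp
        simp [pvOk] at this
        exact this.2
      have hstep : pvStep (some (0 + p.length)) 'd' = some 4 :=
        pv_step_d _ (by omega)
      rw [if_pos hokp, hstep, pv_runStart q 4 (Or.inr rfl) hq]
      by_cases hq0 : q = []
      · simp [hq0, pvOk, PySem.Chars.strIsdigit]
      · by_cases hokq : pvOk q = true
        · have hq1 : 1 ≤ q.length := List.length_pos_iff.mpr hq0
          simp [hq0, hokq, hokp]
          omega
        · simp [hq0, hokq]
    · have hstep : pvStep none 'd' = none := rfl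
      rw [if_neg hokp, hstep, pv_foldl_none]
      simp [List.isEmpty_iff, hp0, Bool.eq_false_iff.mpr hokp]

lemma pv_tail_false (st : Option Nat) (h : pvStep st 'd' = none) (q2 : List Char) :
    (match List.foldl pvStep (pvStep st 'd') q2 with
      | some s => decide (5 ≤ s)
      | none => false) = false := by
  rw [h, pv_foldl_none]

lemma pv_main (input : String) : isDieCommand input = isDieCommand_alt input := by
  by_cases hd : 'd' ∈ PySem.Chars.lower input.toList
  · obtain ⟨p, q, hL, hp⟩ := pv_first_split _ hd
    by_cases hq : 'd' ∈ q
    · -- at least two 'd's: A's count test fails; B hits a second 'd' past state 3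
      have h1 : 0 < q.count 'd' := List.count_pos_iff.mpr hq
      obtain ⟨q1, q2, hQ, hq1⟩ := pv_first_split q hq
      have hA : isDieCommand input = false := by
        simp only [isDieCommand]
        rw [hL]
        have hcp : p.count 'd' = 0 := List.count_eq_zero_of_not_mem hp
        simp [pv_count_single, List.count_append, hcp]
        intro _ h2
        omega
      have hB : isDieCommand_alt input = false := by
        simp only [isDieCommand_alt, hL, hQ, List.foldl_append, List.foldl_cons]
        rw [pv_runStart p 0 (Or.inl rfl) hp]
        by_cases hp0 : p = []
        · rw [if_pos hp0, pv_step_d 0 (by omega), pv_runStart q1 4 (Or.inr rfl) hq1]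
          by_cases hq10 : q1 = []
          · rw [if_pos hq10, pv_step_d_hi 4 (by omega), pv_foldl_none]
          · rw [if_neg hq10]
            by_cases hok1 : pvOk q1 = true
            · have hq11 : 1 ≤ q1.length := List.length_pos_iff.mpr hq10
              rw [if_pos hok1, pv_step_d_hi _ (by omega), pv_foldl_none]
            · rw [if_neg hok1]
              exact pv_tail_false none rfl q2
        · rw [if_neg hp0]
          by_cases hokp : pvOk p = true
          · have hp3 : p.length ≤ 3 := by
              have := hokp; simp [pvOk] at this; exact this.2
            rw [if_pos hokp, pv_step_d _ (by omega), pv_runStart q1 4 (Or.inr rfl) hq1]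
            by_cases hq10 : q1 = []
            · rw [if_pos hq10, pv_step_d_hi 4 (by omega), pv_foldl_none]
            · rw [if_neg hq10]
              by_cases hok1 : pvOk q1 = true
              · have hq11 : 1 ≤ q1.length := List.length_pos_iff.mpr hq10
                rw [if_pos hok1, pv_step_d_hi _ (by omega), pv_foldl_none]
              · rw [if_neg hok1]
                exact pv_tail_false none rfl q2
          · rw [if_neg hokp]
            have hst : pvStep (List.foldl pvStep (pvStep none 'd') q1) 'd' = none := by
              rw [show pvStep (none : Option Nat) 'd' = none from rfl, pv_foldl_none]
              rfl
            exact pv_tail_false _ hst q2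
      rw [hA, hB]
    · rw [pv_A_one input p q hL hp hq, pv_B_one input p q hL hp hq]
  · -- no 'd' at all: A's count is 0; B never leaves the prefix states 0..3
    have hA : isDieCommand input = false := by
      simp only [isDieCommand]
      have hc : (PySem.Chars.lower input.toList).count 'd' = 0 :=
        List.count_eq_zero_of_not_mem hd
      simp [pv_count_single, hc]
    have hB : isDieCommand_alt input = false := by
      simp only [isDieCommand_alt]
      rw [pv_runStart _ 0 (Or.inl rfl) hd]
      by_cases h0 : PySem.Chars.lower input.toList = []
      · simp [h0]
      · rw [if_neg h0]
        by_cases hok : pvOk (PySem.Chars.lower input.toList) = true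
        · have h3 : (PySem.Chars.lower input.toList).length ≤ 3 := by
            have := hok; simp [pvOk] at this; exact this.2
          rw [if_pos hok]
          simp
          omega
        · rw [if_neg hok]
    rw [hA, hB]

-- ===== VERDICT (by name: the statement is the Claim_ definition above) =====
theorem isDieCommand_spec : Claim_equal_isDieCommand := by
  intro input _
  unfold Spec_isDieCommand
  exact pv_main input
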